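-- pv_equiv track=rewrite | github.com/heerucan/PS | 프로그래머스/2/42587. 프로세스/프로세스.py | solution
-- ===== SOURCE A (Python) =====
-- from collections import deque
--
-- def solution(priorities, location):
--     answer = 0
--     queue = deque(priorities)
--     sort_queue = deque(sorted(queue, reverse=True))
--
--     idx = deque()
--     for i in range(len(queue)):
--         idx.append(i)
--
--     cnt = 0
--     while queue:
--         a = queue.popleft()
--
--         if a != sort_queue[0]:
--             queue.append(a)
--             idx.append(idx.popleft())
--         else:
--             cnt += 1
--             sort_queue.popleft()
--             idx_value = idx.popleft()
--             if idx_value == location: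
--                 answer = cnt
--                 break
--
--     return answer
-- ===== SOURCE B (Python) =====
-- from collections import deque
--
-- def solution(priorities, location):
--     qp = deque(priorities)
--     qi = deque(range(len(priorities)))
--     cnt = 0
--     while qp:
--         j = qp.index(max(qp))
--         qp.rotate(-j)
--         qi.rotate(-j)
--         qp.popleft()
--         i = qi.popleft()
--         cnt += 1
--         if i == location:
--             return cnt
--     return 0
-- ===== Notes on version B (the rewrite author's own statement) =====
-- stated objective: faster
-- what changed: B drops A's pre-sorted auxiliary queue entirely: each round it locates the current maximum (max + index) in the remaining queue and rotates the whole block up to it in one jump before executing, instead of A's sort-once-then-pop-the-max-list with element-by-element rotation.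
import Mathlib
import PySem

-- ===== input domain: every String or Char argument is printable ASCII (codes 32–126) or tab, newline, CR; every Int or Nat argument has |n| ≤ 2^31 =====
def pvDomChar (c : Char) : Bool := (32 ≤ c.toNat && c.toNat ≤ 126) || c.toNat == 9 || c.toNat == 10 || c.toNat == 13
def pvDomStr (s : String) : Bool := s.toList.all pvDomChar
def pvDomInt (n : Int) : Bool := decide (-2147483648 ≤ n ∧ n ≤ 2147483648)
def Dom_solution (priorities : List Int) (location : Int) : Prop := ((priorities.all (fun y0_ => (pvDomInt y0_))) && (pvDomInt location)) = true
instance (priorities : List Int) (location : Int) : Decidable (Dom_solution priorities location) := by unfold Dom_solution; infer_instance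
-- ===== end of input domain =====

-- B replaces A's pre-sorted max-queue + element-by-element rotation with a per-round scan
-- for the current maximum and a single block rotation up to it (a different pass shape; a timing run measured B faster).


-- ===== PORT A =====
-- A's while loop, with a fuel guard for totality only (fuel (n+1)^2 exceeds the ≤ n^2
-- steps the Python loop ever performs); `headD 0` guards the pops that Python's length
-- invariants keep in range.
def solutionLoop (location : Int) : Nat → List Int → List Int → List Int → Int → Int
  | 0, _, _, _, _ => 0
  | fuel + 1, queue, sortq, idx, cnt =>
    match queue with
    | [] => 0
    | a :: rest =>
      if a ≠ sortq.headD 0 then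
        solutionLoop location fuel (rest ++ [a]) sortq (idx.tail ++ idx.take 1) cnt
      else
        if idx.headD 0 = location then cnt + 1
        else solutionLoop location fuel rest sortq.tail idx.tail (cnt + 1)

def solution (priorities : List Int) (location : Int) : Int :=
  let queue := priorities
  let sortq := PySem.List.sorted queue (fun x => x) true
  let idx := PySem.List.pyRange 0 (queue.length : Int) 1
  solutionLoop location ((queue.length + 1) * (queue.length + 1)) queue sortq idx 0

-- ===== PORT B =====
-- B's while loop: j = qp.index(max(qp)); qp.rotate(-j); qi.rotate(-j); pop and execute.
-- The `.getD` defaults are unreachable guards (the queue is nonempty there); recursion is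
-- on the queue length, which drops by one each round exactly as the Python deque does.
def altLoop (location : Int) (qp qi : List Int) (cnt : Int) : Int :=
  match qp with
  | [] => 0
  | a :: rest =>
    let m := (PySem.List.max? (a :: rest) (fun x => x)).getD 0
    let j := (PySem.List.index? (a :: rest) m).getD 0
    let qp' := (a :: rest).rotate j
    let qi' := qi.rotate j
    if qi'.headD 0 = location then cnt + 1
    else altLoop location qp'.tail qi'.tail (cnt + 1)
termination_by qp.length
decreasing_by
  simp [List.length_tail, List.length_rotate]

def solution_alt (priorities : List Int) (location : Int) : Int :=
  altLoop location priorities (PySem.List.pyRange 0 (priorities.length : Int) 1) 0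

-- ===== PRECONDITION & SPEC =====
def Spec_solution (priorities : List Int) (location : Int) (out : Int) : Prop := out = solution_alt priorities location
instance (priorities : List Int) (location : Int) (out : Int) : Decidable (Spec_solution priorities location out) := by unfold Spec_solution; infer_instance

-- ===== CLAIM (what is proved, stated in full; the proofs are below) =====
def Claim_equal_solution : Prop := ∀ (priorities : List Int) (location : Int), Dom_solution priorities location → Spec_solution priorities location (solution priorities location)

-- ===== LEMMAS AND PROOFS =====

-- j consecutive rotation steps of A's loop (all j front elements strictly below the max b,
-- so each step takes the rotate branch) amount to one block rotation by j.
lemma rot_steps (location b : Int) : ∀ (j fuel : Nat) (q sq' idx : List Int) (cnt : Int),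
    j + 1 ≤ fuel → j < q.length → idx.length = q.length →
    (∀ k, k < j → q.getD k 0 < b) →
    solutionLoop location fuel q (b :: sq') idx cnt
      = solutionLoop location (fuel - j) (q.rotate j) (b :: sq') (idx.rotate j) cnt := by
  intro j
  induction j with
  | zero =>
    intro fuel q sq' idx cnt _ _ _ _
    simp [List.rotate_zero]
  | succ j ih =>
    intro fuel q sq' idx cnt hfuel hjq hlen hlt
    cases q with
    | nil => simp at hjq
    | cons a rest =>
      cases idx with
      | nil => simp at hlen
      | cons i ridx =>
        obtain ⟨f, rfl⟩ : ∃ f, fuel = f + 1 := ⟨fuel - 1, by omega⟩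
        have ha : a < b := by simpa using hlt 0 (Nat.succ_pos j)
        have hstep : solutionLoop location (f + 1) (a :: rest) (b :: sq') (i :: ridx) cnt
            = solutionLoop location f (rest ++ [a]) (b :: sq') (ridx ++ [i]) cnt := by
          simp only [solutionLoop, List.headD_cons, List.tail_cons, List.take_succ_cons,
            List.take_zero]
          rw [if_pos (ne_of_lt ha)]
        rw [hstep, List.rotate_cons_succ, List.rotate_cons_succ,
          show (f + 1) - (j + 1) = f - j by omega]
        have hjr : j < rest.length := by simpa using Nat.lt_of_succ_lt_succ hjq
        refine ih f (rest ++ [a]) sq' (ridx ++ [i]) cnt (by omega) (by simp; omega)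
          (by simpa using Nat.succ_injective hlen) ?_
        intro k hk
        have hkr : k < rest.length := lt_trans hk hjr
        rw [List.getD_append _ _ _ _ hkr]
        have := hlt (k + 1) (Nat.succ_lt_succ hk)
        simpa using this

-- Lockstep (one B round = j+1 A steps) simulation: A's sort_queue is any ≥-sorted
-- permutation of A's queue, idx runs parallel to the queue, and A's fuel stays above
-- (length of queue)².
lemma loop_eq (location : Int) : ∀ (n : Nat) (q sq idx : List Int) (cnt : Int) (fuel : Nat),
    q.length = n → n * n < fuel →
    sq.Pairwise (fun a b => b ≤ a) → sq.Perm q → idx.length = q.length →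
    solutionLoop location fuel q sq idx cnt = altLoop location q idx cnt := by
  intro n
  induction n with
  | zero =>
    intro q sq idx cnt fuel hq hf _ _ _
    obtain rfl : q = [] := List.length_eq_zero_iff.mp hq
    obtain ⟨f, rfl⟩ : ∃ f, fuel = f + 1 := ⟨fuel - 1, by omega⟩
    simp [solutionLoop, altLoop]
  | succ n ih =>
    intro q sq idx cnt fuel hq hf hsort hperm hlen
    rw [show (n + 1) * (n + 1) = n * n + 2 * n + 1 from by ring] at hf
    cases q with
    | nil => simp at hq
    | cons a rest =>
      obtain ⟨b, sq', rfl⟩ : ∃ b sq', sq = b :: sq' := by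
        cases sq with
        | nil => have := hperm.length_eq; simp at this
        | cons b t => exact ⟨b, t, rfl⟩
      have hbmax : ∀ x ∈ a :: rest, x ≤ b := by
        intro x hx
        rcases List.mem_cons.mp (hperm.symm.mem_iff.mp hx) with h | h
        · exact le_of_eq h
        · exact (List.pairwise_cons.mp hsort).1 x h
      have hbmem : b ∈ a :: rest := hperm.mem_iff.mp List.mem_cons_self
      have hm : PySem.List.max? (a :: rest) (fun x => x) = some b := by
        cases hmx : PySem.List.max? (a :: rest) (fun x => x) with
        | none => exact absurd ((PySem.List.max?_eq_none_iff _ _).mp hmx) (by simp)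
        | some m =>
          have h1 : m ≤ b := hbmax m (PySem.List.max?_mem hmx)
          have h2 : b ≤ m := PySem.List.max?_isMax hmx b hbmem
          rw [le_antisymm h1 h2]
      obtain ⟨j, hj⟩ : ∃ j, PySem.List.index? (a :: rest) b = some j :=
        Option.isSome_iff_exists.mp ((PySem.List.index?_isSome_iff _ _).mpr hbmem)
      obtain ⟨hjlen, hqj, hne⟩ := PySem.List.getElem_of_index?_eq_some hj
      -- A performs j rotation steps …
      rw [rot_steps location b j fuel (a :: rest) sq' idx cnt
        (by simp at hq hjlen; omega) hjlen hlen
        (fun k hk => by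
          have hkl : k < (a :: rest).length := lt_trans hk hjlen
          rw [List.getD_eq_getElem _ _ hkl]
          exact lt_of_le_of_ne (hbmax _ (List.getElem_mem hkl)) (hne k hk))]
      -- … then executes the front, which now is the maximum b
      have hrot : (a :: rest).rotate j = b :: ((a :: rest).drop (j + 1) ++ (a :: rest).take j) := by
        rw [List.rotate_eq_drop_append_take (le_of_lt hjlen),
          List.drop_eq_getElem_cons hjlen, hqj]
        simp
      obtain ⟨f, hfeq⟩ : ∃ f, fuel - j = f + 1 := ⟨fuel - j - 1, by simp at hq hjlen; omega⟩
      rw [hfeq, hrot]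
      simp only [solutionLoop, List.headD_cons, List.tail_cons]
      rw [if_neg (show ¬ (b ≠ b) from fun h => h rfl)]
      -- B's single round
      conv_rhs => rw [altLoop]
      simp only [hm, hj, Option.getD_some, hrot, List.tail_cons]
      by_cases hloc : (idx.rotate j).headD 0 = location
      · rw [if_pos hloc, if_pos hloc]
      · rw [if_neg hloc, if_neg hloc]
        have hlq : ((a :: rest).drop (j + 1) ++ (a :: rest).take j).length = n := by
          simp at hq hjlen ⊢
          omega
        refine ih _ sq' _ (cnt + 1) f hlq (by simp at hq hjlen; omega)
          (List.Pairwise.of_cons hsort) ?_ ?_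
        · have h1 : (b :: sq').Perm ((a :: rest).rotate j) :=
            hperm.trans (List.rotate_perm (a :: rest) j).symm
          rw [hrot] at h1
          exact h1.cons_inv
        · simp [List.length_rotate, hlen]
          simp at hq hjlen
          omega

-- ===== VERDICT (by name: the statement is the Claim_ definition above) =====
theorem solution_spec : Claim_equal_solution := by
  intro priorities location _
  unfold Spec_solution solution solution_alt
  refine loop_eq location priorities.length priorities _ _ 0 _ rfl (by nlinarith)
    (by simpa using PySem.List.sorted_pairwise_rev priorities (fun x => x))
    (PySem.List.sorted_perm priorities (fun x => x) true)
    (by simp [PySem.List.length_pyRange_one])
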